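-- pv_equiv track=rewrite | github.com/waitblock/Competitive-Programming | ACSL/2020-21_acsllexstring.py | rearrangedString
-- ===== SOURCE A (Python) =====
-- from string import ascii_lowercase
--
-- def addString(list):
--     added = []
--     toAdd = []
--     for i in range(len(list)):
--         if list[i] not in added:
--             toAdd.append(list[i])
--             added.append(list[i])
--
--     return toAdd
--
-- def deleteNextTo(s):
--     if len(s) == 1:
--         return s
--     if s[0] == s[1]:
--         return deleteNextTo(s[1:])
--     else:
--         return s[0] + deleteNextTo(s[1:])
--
-- def rearrangedString(s):
--     new = []
--     s = s.lower()
--     s_list = list(s)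
--     for i in range(len(s_list)):
--         if s_list[i] not in ascii_lowercase:
--             s_list[i] = ""
--
--     while len(s_list) > 0:
--         toAdd = sorted(addString(s_list))
--         toAdd_s = ""
--         for i in range(len(toAdd)):
--             toAdd_s += toAdd[i]
--         new.append(toAdd_s)
--         for c in toAdd:
--             s_list.remove(c)
--
--     s = ""
--
--     for c in new:
--         s += c
--
--
--     return deleteNextTo(s)
-- ===== SOURCE B (Python) =====
-- from string import ascii_lowercase
--
-- def rearrangedString(s):
--     # count each lowercase letter once, in one pass
--     counts = {}
--     for c in s.lower():
--         if c in ascii_lowercase: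
--             counts[c] = counts.get(c, 0) + 1
--     # level k (k = 1..max count) contributes the sorted letters occurring >= k
--     # times; collapse adjacent duplicates while emitting
--     out = []
--     for k in range(1, max(counts.values()) + 1):
--         for c in sorted(ch for ch in counts if counts[ch] >= k):
--             if not out or out[-1] != c:
--                 out.append(c)
--     return ''.join(out)
-- ===== Notes on version B (the rewrite author's own statement) =====
-- stated objective: faster
-- what changed: Replaces the quadratic remove-one-of-each-distinct loop over the character list (repeated membership scans, list.remove, and a recursive adjacent-duplicate pass) with a single counting pass plus per-frequency-level emission of sorted letters with inline collapse of adjacent duplicates.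
import Mathlib
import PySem

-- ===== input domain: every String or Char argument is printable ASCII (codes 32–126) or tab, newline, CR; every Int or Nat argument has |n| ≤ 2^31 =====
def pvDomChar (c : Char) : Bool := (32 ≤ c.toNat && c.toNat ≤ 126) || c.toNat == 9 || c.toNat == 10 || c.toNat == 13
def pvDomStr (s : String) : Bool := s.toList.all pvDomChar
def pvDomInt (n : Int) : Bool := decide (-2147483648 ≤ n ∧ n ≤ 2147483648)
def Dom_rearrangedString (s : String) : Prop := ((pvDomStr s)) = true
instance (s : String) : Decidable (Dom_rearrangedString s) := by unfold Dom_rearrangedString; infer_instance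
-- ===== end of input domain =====

-- B replaces A's quadratic remove-one-of-each-distinct loop by one counting pass
-- plus per-frequency-level emission of sorted letters with inline duplicate collapse.
-- Python strings are ported as their List Char of code points (PySem.Chars side).

-- ===== PORT A =====
-- ascii_lowercase (module constant used by both programs)
def pvLetters : List Char := "abcdefghijklmnopqrstuvwxyz".toList

-- addString(list): builds `added`/`toAdd` in one left-to-right pass
def pvAddString (l : List (List Char)) : List (List Char) :=
  (l.foldl (fun st x => if st.1.contains x then st else (st.1 ++ [x], st.2 ++ [x]))
    (([], []) : List (List Char) × List (List Char))).2

-- deleteNextTo(s): s = [] is Python's IndexError case (unreachable from nonempty input)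
def pvDeleteNextTo : List Char → List Char
  | [] => []
  | [a] => [a]
  | a :: b :: t => if a = b then pvDeleteNextTo (b :: t) else a :: pvDeleteNextTo (b :: t)

-- s_list.remove(c); the element is always present, so getD never fires the default
def pvRm (l : List (List Char)) (c : List Char) : List (List Char) :=
  (PySem.List.remove? l c).getD l

-- termination support for the while loop (cited by pvWhileA's decreasing_by)
theorem pvAddString_eq_ofList (l : List (List Char)) : pvAddString l = PySem.Set.ofList l := by
  have key : ∀ (ys s : List (List Char)),
      ys.foldl (fun st x => if st.1.contains x then st else (st.1 ++ [x], st.2 ++ [x])) (s, s)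
        = (ys.foldl PySem.Set.add s, ys.foldl PySem.Set.add s) := by
    intro ys
    induction ys with
    | nil => intro s; rfl
    | cons y t ih =>
        intro s
        cases h : s.contains y with
        | true =>
            simp only [List.foldl_cons, h, reduceIte]
            have ha : PySem.Set.add s y = s := by unfold PySem.Set.add PySem.Set.contains; rw [h]; simp
            rw [ha] at *
            exact ih s
        | false =>
            simp only [List.foldl_cons, h, Bool.false_eq_true, reduceIte]
            have ha : PySem.Set.add s y = s ++ [y] := by unfold PySem.Set.add PySem.Set.contains; rw [h]; simp
            rw [ha]
            exact ih (s ++ [y])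
  rw [pvAddString, key l []]
  rfl

theorem pvRm_length_le (l : List (List Char)) (c : List Char) :
    (pvRm l c).length ≤ l.length := by
  unfold pvRm
  by_cases h : c ∈ l
  · rw [PySem.List.remove?_eq_some_erase l c h]
    simp only [Option.getD_some, List.length_erase, if_pos h]
    omega
  · rw [(PySem.List.remove?_eq_none_iff l c).mpr h]
    simp

theorem pvFoldRm_length_le (ys : List (List Char)) : ∀ (l : List (List Char)),
    (ys.foldl pvRm l).length ≤ l.length := by
  induction ys with
  | nil => intro l; simp
  | cons y t ih =>
      intro l
      simp only [List.foldl_cons]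
      exact le_trans (ih (pvRm l y)) (pvRm_length_le l y)

theorem pvWhile_dec (xs : List (List Char)) (h : 0 < xs.length) :
    ((PySem.List.sorted (pvAddString xs) (fun x => x) false).foldl pvRm xs).length < xs.length := by
  obtain ⟨z, zs, rfl⟩ := List.exists_cons_of_ne_nil (show xs ≠ [] by rintro rfl; simp at h)
  have hofne : z ∈ PySem.Set.ofList (z :: zs) := (PySem.Set.mem_ofList _ _).mpr List.mem_cons_self
  have hsne : PySem.List.sorted (pvAddString (z :: zs)) (fun x => x) false ≠ [] := by
    rw [Ne, PySem.List.sorted_eq_nil_iff, pvAddString_eq_ofList]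
    exact List.ne_nil_of_mem hofne
  obtain ⟨a, rest, heq⟩ := List.exists_cons_of_ne_nil hsne
  have ha : a ∈ z :: zs := by
    have : a ∈ PySem.List.sorted (pvAddString (z :: zs)) (fun x => x) false := by
      rw [heq]; exact List.mem_cons_self
    rwa [PySem.List.mem_sorted, pvAddString_eq_ofList, PySem.Set.mem_ofList] at this
  rw [heq, List.foldl_cons]
  have h1 : (pvRm (z :: zs) a).length < (z :: zs).length := by
    unfold pvRm
    rw [PySem.List.remove?_eq_some_erase _ a ha]
    have := List.length_erase_of_mem ha
    simp only [Option.getD_some]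
    omega
  exact lt_of_le_of_lt (pvFoldRm_length_le rest _) h1

-- the `while len(s_list) > 0` loop, returning the list `new` of layer strings
def pvWhileA (xs : List (List Char)) : List (List Char) :=
  if h : 0 < xs.length then
    let toAdd := PySem.List.sorted (pvAddString xs) (fun x => x) false
    (toAdd.foldl (fun acc t => acc ++ t) []) :: pvWhileA (toAdd.foldl pvRm xs)
  else []
termination_by xs.length
decreasing_by exact pvWhile_dec xs h

def rearrangedString (s : String) : String :=
  let sList : List (List Char) := (PySem.Str.lower s).toList.map (fun c => [c])
  let sList2 := sList.map (fun x => if PySem.Chars.isIn x pvLetters then x else [])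
  let new := pvWhileA sList2
  String.mk (pvDeleteNextTo (new.foldl (fun acc c => acc ++ c) []))

-- ===== PORT B =====
-- `if not out or out[-1] != c: out.append(c)`
def pvStep (out : List Char) (c : Char) : List Char :=
  match out.getLast? with
  | none => out ++ [c]
  | some p => if p = c then out else out ++ [c]

def rearrangedString_alt (s : String) : String :=
  let counts : PySem.Dict Char Int :=
    (PySem.Str.lower s).toList.foldl
      (fun d c => if PySem.Chars.isIn [c] pvLetters then d.insert c (d.getD c 0 + 1) else d)
      PySem.Dict.empty
  match PySem.List.max? counts.values (fun v => v) with
  | none => ""   -- max() on an empty sequence raises ValueError in Python; outside Pre_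
  | some mx =>
    String.mk ((PySem.List.pyRange 1 (mx + 1)).foldl
      (fun out k =>
        (PySem.List.sorted (counts.keys.filter (fun ch => decide (k ≤ counts.getD ch 0)))
            (fun c => c) false).foldl pvStep out) [])

-- ===== PRECONDITION & SPEC =====
-- A raises IndexError (and B ValueError) when the input contains no ASCII letter;
-- Pre_ requires at least one letter (equivalently: the lowercased string contains one of a-z).
def Pre_rearrangedString (s : String) : Prop :=
  ((PySem.Str.lower s).toList.any (fun c => pvLetters.contains c)) = true
instance (s : String) : Decidable (Pre_rearrangedString s) := by
  unfold Pre_rearrangedString; infer_instance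

def pvWitness_rearrangedString : String := "ab"

def Spec_rearrangedString (s : String) (out : String) : Prop := out = rearrangedString_alt s
instance (s : String) (out : String) : Decidable (Spec_rearrangedString s out) := by
  unfold Spec_rearrangedString; infer_instance

-- ===== CLAIM (what is proved, stated in full; the proofs are below) =====
def Claim_equal_rearrangedString : Prop :=
  ∀ (s : String), Dom_rearrangedString s → Pre_rearrangedString s →
    Spec_rearrangedString s (rearrangedString s)

-- ===== LEMMAS AND PROOFS =====

-- canonical middle form: per-level letters of a count function
def pvLevel (m : Char → Nat) (k : Nat) : List Char :=
  pvLetters.filter (fun c => decide (k ≤ m c))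

def pvSum (m : Char → Nat) : Nat := (pvLetters.map m).sum

theorem pvSumMapPredLe (l : List Char) (m : Char → Nat) :
    (l.map (fun c => m c - 1)).sum ≤ (l.map m).sum := by
  induction l with
  | nil => simp
  | cons a t ih => simp only [List.map_cons, List.sum_cons]; omega

theorem pvSumMapPredLt (l : List Char) (m : Char → Nat) (h : (l.map m).sum ≠ 0) :
    (l.map (fun c => m c - 1)).sum < (l.map m).sum := by
  induction l with
  | nil => simp at h
  | cons a t ih =>
      simp only [List.map_cons, List.sum_cons] at h ⊢
      by_cases ha : m a = 0
      · have := ih (by omega)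
        omega
      · have := pvSumMapPredLe t m
        omega

def pvCanon (m : Char → Nat) : List Char :=
  if h : pvSum m = 0 then [] else pvLevel m 1 ++ pvCanon (fun c => m c - 1)
termination_by pvSum m
decreasing_by exact pvSumMapPredLt pvLetters m h

def pvCollapseFrom (p : Char) : List Char → List Char
  | [] => []
  | c :: t => if c = p then pvCollapseFrom p t else c :: pvCollapseFrom c t

-- count function of the lowered input
def pvMof (ls : List Char) : Char → Nat :=
  fun c => (ls.filter (fun x => pvLetters.contains x)).count c

theorem pvLetters_pairwise : pvLetters.Pairwise (fun a b => a < b) := by decide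

theorem pvLetters_nodup : pvLetters.Nodup := pvLetters_pairwise.imp ne_of_lt

theorem pvIsIn_singleton (c : Char) :
    PySem.Chars.isIn [c] pvLetters = pvLetters.contains c := by
  by_cases h : c ∈ pvLetters
  · rw [(PySem.Chars.isIn_iff_infix _ _).mpr ((List.singleton_infix_iff c _).mpr h)]
    symm; simpa using h
  · rw [(PySem.Chars.isIn_eq_false_iff _ _).mpr (by rw [List.singleton_infix_iff]; exact h)]
    symm; simpa using h

-- ----- collapse: A's recursive deleteNextTo = B's online fold -----
theorem pvFoldStep_from (l : List Char) : ∀ (acc : List Char) (p : Char),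
    l.foldl pvStep (acc ++ [p]) = acc ++ p :: pvCollapseFrom p l := by
  induction l with
  | nil => intro acc p; simp [pvCollapseFrom]
  | cons c t ih =>
      intro acc p
      rw [List.foldl_cons]
      have hstep : pvStep (acc ++ [p]) c = if c = p then acc ++ [p] else (acc ++ [p]) ++ [c] := by
        unfold pvStep
        rw [List.getLast?_concat]
        by_cases hc : c = p
        · simp [hc]
        · have hpc : ¬ p = c := fun h => hc h.symm
          simp [hc, hpc]
      rw [hstep]
      by_cases hc : c = p
      · rw [if_pos hc, ih acc p, pvCollapseFrom, if_pos hc]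
      · rw [if_neg hc, ih (acc ++ [p]) c, pvCollapseFrom, if_neg hc]
        simp

theorem pvDeleteNextTo_cf (t : List Char) : ∀ (p : Char),
    pvDeleteNextTo (p :: t) = p :: pvCollapseFrom p t := by
  induction t with
  | nil => intro p; rfl
  | cons d t' ih =>
      intro p
      rw [pvDeleteNextTo, ih d, pvCollapseFrom]
      by_cases hpd : p = d
      · rw [if_pos hpd, if_pos hpd.symm, hpd]
      · rw [if_neg hpd, if_neg (fun h => hpd h.symm)]

theorem pvDnt_eq_fold (l : List Char) : pvDeleteNextTo l = l.foldl pvStep [] := by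
  cases l with
  | nil => rfl
  | cons c t =>
      rw [List.foldl_cons]
      have h1 : pvStep [] c = [] ++ [c] := rfl
      rw [h1, pvFoldStep_from t [] c, pvDeleteNextTo_cf t c]
      simp

-- ----- generic fold shapes -----
-- ----- A-side: the while loop computes pvCanon of the multiset of the list -----
theorem pvFoldRm_count (ys : List (List Char)) : ∀ (l : List (List Char)), ys.Nodup →
    (∀ y ∈ ys, y ∈ l) → ∀ v, (ys.foldl pvRm l).count v = l.count v - (if v ∈ ys then 1 else 0) := by
  induction ys with
  | nil => intro l _ _ v; simp
  | cons y t ih =>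
      intro l hnd hmem v
      have hyl : y ∈ l := hmem y List.mem_cons_self
      have hrm : pvRm l y = l.erase y := by
        unfold pvRm; rw [PySem.List.remove?_eq_some_erase l y hyl]; rfl
      rw [List.foldl_cons, hrm]
      have hnd' : t.Nodup := hnd.of_cons
      have hyt : y ∉ t := (List.nodup_cons.mp hnd).1
      have hmem' : ∀ z ∈ t, z ∈ l.erase y := by
        intro z hz
        exact (List.mem_erase_of_ne (fun h : z = y => hyt (h ▸ hz))).mpr (hmem z (List.mem_cons_of_mem y hz))
      rw [ih (l.erase y) hnd' hmem' v]
      have hce : (l.erase y).count v = l.count v - if y = v then 1 else 0 := by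
        rw [List.count_erase]
        simp
      rw [hce]
      by_cases hv : v = y
      · subst hv
        rw [if_pos rfl, if_pos List.mem_cons_self, if_neg hyt]
        omega
      · rw [if_neg (fun h => hv h.symm)]
        simp only [List.mem_cons]
        by_cases hvt : v ∈ t
        · rw [if_pos (Or.inr hvt), if_pos hvt]
          omega
        · have hno : ¬(v = y ∨ v ∈ t) := by
            rintro (h | h)
            · exact hv h
            · exact hvt h
          rw [if_neg hno, if_neg hvt]
          omega

theorem pvFoldRm_subset (ys : List (List Char)) : ∀ (l : List (List Char)) (x : List Char),
    x ∈ ys.foldl pvRm l → x ∈ l := by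
  induction ys with
  | nil => intro l x hx; simpa using hx
  | cons y t ih =>
      intro l x hx
      rw [List.foldl_cons] at hx
      have h1 : x ∈ pvRm l y := ih (pvRm l y) x hx
      unfold pvRm at h1
      cases hr : PySem.List.remove? l y with
      | none => rwa [hr] at h1
      | some l' =>
          rw [hr] at h1
          have hy : y ∈ l := by
            by_contra hny
            rw [(PySem.List.remove?_eq_none_iff l y).mpr hny] at hr
            cases hr
          rw [PySem.List.remove?_eq_some_erase l y hy] at hr
          cases hr
          exact List.erase_sublist.mem h1

theorem pvSortedBridge (xs ys : List (List Char)) (hp : ys.Perm xs)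
    (hpw : ys.Pairwise (· < ·)) : PySem.List.sorted xs (fun x => x) false = ys := by
  rw [show (fun (a b : List Char) => a.decidableLT b) = (List.instLinearOrder.toDecidableLT :
      DecidableLT (List Char)) from funext fun a => funext fun b => Subsingleton.elim _ _]
  exact PySem.List.sorted_eq_of_perm_of_pairwise_lt xs ys _ hp hpw

theorem pvSortedBridgeC (xs ys : List Char) (hp : ys.Perm xs)
    (hpw : ys.Pairwise (· < ·)) : PySem.List.sorted xs (fun c => c) false = ys :=
  PySem.List.sorted_eq_of_perm_of_pairwise_lt xs ys _ hp hpw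

theorem pvLayerA (xs : List (List Char))
    (hwf : ∀ x ∈ xs, x = [] ∨ ∃ c, c ∈ pvLetters ∧ x = [c]) :
    PySem.List.sorted (pvAddString xs) (fun x => x) false =
      (if ([] : List Char) ∈ xs then [([] : List Char)] else []) ++
        (pvLevel (fun c => xs.count [c]) 1).map (fun c => [c]) := by
  apply pvSortedBridge
  · rw [pvAddString_eq_ofList]
    have hnd1 : ((if ([] : List Char) ∈ xs then [([] : List Char)] else []) ++
        (pvLevel (fun c => xs.count [c]) 1).map (fun c => [c])).Nodup := by
      apply List.Nodup.append
      · split_ifs <;> simp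
      · exact (pvLetters_nodup.filter _).map (fun a b h => by simpa using h)
      · intro a ha hb
        rcases List.mem_map.mp hb with ⟨c, _, rfl⟩
        split_ifs at ha with h
        · simp at ha
        · simp at ha
    rw [List.perm_ext_iff_of_nodup hnd1 (PySem.Set.nodup_ofList xs)]
    intro a
    rw [PySem.Set.mem_ofList, List.mem_append]
    constructor
    · rintro (h1 | h2)
      · split_ifs at h1 with hn
        · have : a = [] := by simpa using h1
          rwa [this]
        · simp at h1
      · rcases List.mem_map.mp h2 with ⟨c, hc, rfl⟩
        unfold pvLevel at hc
        rw [List.mem_filter] at hc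
        have h1 : 1 ≤ xs.count [c] := by simpa using hc.2
        exact List.count_pos_iff.mp (by omega)
    · intro ha
      rcases hwf a ha with rfl | ⟨c, hcl, rfl⟩
      · left; rw [if_pos ha]; simp
      · right
        refine List.mem_map.mpr ⟨c, ?_, rfl⟩
        unfold pvLevel
        rw [List.mem_filter]
        refine ⟨hcl, ?_⟩
        have : 0 < xs.count [c] := List.count_pos_iff.mpr ha
        simp
        omega
  · apply List.pairwise_append.mpr
    refine ⟨?_, ?_, ?_⟩
    · split_ifs <;> simp
    · apply List.Pairwise.map (R := fun a b : Char => a < b)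
      · intro c d hcd; exact List.Lex.rel hcd
      · exact pvLetters_pairwise.filter _
    · intro a ha b hb
      rcases List.mem_map.mp hb with ⟨c, _, rfl⟩
      split_ifs at ha with h
      · have : a = [] := by simpa using ha
        rw [this]
        exact List.nil_lt_cons c []
      · simp at ha

theorem pvWhileA_eq (xs : List (List Char)) (h : 0 < xs.length) :
    pvWhileA xs = ((PySem.List.sorted (pvAddString xs) (fun x => x) false).foldl
        (fun acc t => acc ++ t) []) ::
      pvWhileA ((PySem.List.sorted (pvAddString xs) (fun x => x) false).foldl pvRm xs) := by
  rw [pvWhileA, dif_pos h]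

theorem pvWhileA_nil : pvWhileA [] = [] := by
  rw [pvWhileA]
  simp

theorem pvCanon_of_nil : pvCanon (fun c => List.count [c] ([] : List (List Char))) = [] := by
  rw [pvCanon, dif_pos]
  unfold pvSum
  rw [List.sum_eq_zero_iff]
  intro x hx
  rcases List.mem_map.mp hx with ⟨c, _, rfl⟩
  simp

theorem pvWhileA_flatten : ∀ (n : Nat) (xs : List (List Char)), xs.length ≤ n →
    (∀ x ∈ xs, x = [] ∨ ∃ c, c ∈ pvLetters ∧ x = [c]) →
    (pvWhileA xs).flatten = pvCanon (fun c => xs.count [c]) := by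
  intro n
  induction n with
  | zero =>
      intro xs hlen _
      have : xs = [] := List.eq_nil_of_length_eq_zero (Nat.le_zero.mp hlen)
      subst this
      rw [pvWhileA_nil, pvCanon_of_nil]
      rfl
  | succ n ih =>
      intro xs hlen hwf
      by_cases hx : 0 < xs.length
      case neg =>
        have : xs = [] := by
          cases xs with
          | nil => rfl
          | cons a t => simp at hx
        subst this
        rw [pvWhileA_nil, pvCanon_of_nil]
        rfl
      case pos =>
        rw [pvWhileA_eq xs hx, List.flatten_cons]
        set m : Char → Nat := fun c => xs.count [c] with hm
        set toAdd := PySem.List.sorted (pvAddString xs) (fun x => x) false with hta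
        have hperm : toAdd.Perm (pvAddString xs) := PySem.List.sorted_perm _ _ _
        have hnd : toAdd.Nodup := by
          rw [hta]
          exact hperm.nodup_iff.mpr (pvAddString_eq_ofList xs ▸ PySem.Set.nodup_ofList xs)
        have hmemAdd : ∀ y ∈ toAdd, y ∈ xs := by
          intro y hy
          rw [hta, PySem.List.mem_sorted, pvAddString_eq_ofList, PySem.Set.mem_ofList] at hy
          exact hy
        have hcount := pvFoldRm_count toAdd xs hnd hmemAdd
        have hcount' : ∀ c : Char, (toAdd.foldl pvRm xs).count [c] = m c - 1 := by
          intro c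
          rw [hcount [c]]
          by_cases hc : ([c] : List Char) ∈ xs
          · rw [if_pos (by rw [hta, PySem.List.mem_sorted, pvAddString_eq_ofList,
              PySem.Set.mem_ofList]; exact hc)]
          · have h0 : m c = 0 := List.count_eq_zero.mpr hc
            rw [if_neg (fun hmm => hc (hmemAdd [c] hmm)),
              show List.count ([c] : List Char) xs = m c from rfl, h0]
        have hwf' : ∀ x ∈ toAdd.foldl pvRm xs, x = [] ∨ ∃ c, c ∈ pvLetters ∧ x = [c] :=
          fun x hxm => hwf x (pvFoldRm_subset toAdd xs x hxm)
        have hlen' : (toAdd.foldl pvRm xs).length ≤ n := by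
          have := pvWhile_dec xs hx
          rw [← hta] at this
          omega
        rw [ih _ hlen' hwf']
        have hmeq : (fun c => (toAdd.foldl pvRm xs).count [c]) = (fun c => m c - 1) :=
          funext hcount'
        rw [hmeq]
        have hlayer := pvLayerA xs hwf
        rw [← hm, ← hta] at hlayer
        have hlayerS : toAdd.foldl (fun acc t => acc ++ t) [] = pvLevel m 1 := by
          rw [hlayer, PySem.List.foldl_append_eq_flatMap (fun t : List Char => t)]
          have hsing : ((pvLevel m 1).map (fun c => [c])).flatMap (fun t : List Char => t)
              = pvLevel m 1 := by
            induction pvLevel m 1 with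
            | nil => rfl
            | cons a t ihs => simp_all
          rw [List.flatMap_append, hsing]
          split_ifs <;> rfl
        rw [hlayerS]
        by_cases hsum : pvSum m = 0
        · have hz : ∀ c ∈ pvLetters, m c = 0 := by
            intro c hc
            exact List.sum_eq_zero_iff.mp hsum (m c) (List.mem_map.mpr ⟨c, hc, rfl⟩)
          have hlev : pvLevel m 1 = [] := by
            unfold pvLevel
            rw [List.filter_eq_nil_iff]
            intro c hc
            simp [hz c hc]
          have hsum' : pvSum (fun c => m c - 1) = 0 := by
            unfold pvSum
            rw [List.sum_eq_zero_iff]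
            intro x hx
            rcases List.mem_map.mp hx with ⟨c, hc, rfl⟩
            simp [hz c hc]
          rw [hlev, pvCanon, dif_pos hsum', pvCanon, dif_pos hsum]
          rfl
        · conv_rhs => rw [pvCanon, dif_neg hsum]

theorem pvCountA (ls : List Char) (c : Char) :
    ((ls.map (fun c => if PySem.Chars.isIn [c] pvLetters then [c] else ([] : List Char))).count [c])
      = pvMof ls c := by
  unfold pvMof
  induction ls with
  | nil => rfl
  | cons a t ih =>
      simp only [List.map_cons, List.filter_cons, pvIsIn_singleton a]
      by_cases ha : pvLetters.contains a = true
      · rw [if_pos ha, if_pos ha, List.count_cons, List.count_cons, ih]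
        by_cases hac : a = c
        · simp [hac]
        · have hne : (([a] : List Char) == [c]) = false := by
            simp
            exact fun h => hac h
          simp [hac, hne]
      · rw [if_neg ha, if_neg ha, List.count_cons, ih]
        simp

-- ----- canon = flattened levels 1..N for any N bounding the counts -----
theorem pvCanon_flat : ∀ (N : Nat) (m : Char → Nat), (∀ c ∈ pvLetters, m c ≤ N) →
    pvCanon m = ((List.range N).map (fun i => pvLevel m (i + 1))).flatten := by
  intro N
  induction N with
  | zero =>
      intro m hb
      have hs : pvSum m = 0 := by
        unfold pvSum
        rw [List.sum_eq_zero_iff]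
        intro x hx
        rcases List.mem_map.mp hx with ⟨c, hc, rfl⟩
        exact Nat.le_zero.mp (hb c hc)
      rw [pvCanon, dif_pos hs]
      rfl
  | succ N ih =>
      intro m hb
      by_cases hs : pvSum m = 0
      · have hz : ∀ c ∈ pvLetters, m c = 0 := by
          intro c hc
          exact List.sum_eq_zero_iff.mp hs (m c) (List.mem_map.mpr ⟨c, hc, rfl⟩)
        rw [pvCanon, dif_pos hs]
        symm
        rw [List.flatten_eq_nil_iff]
        intro l hl
        rcases List.mem_map.mp hl with ⟨i, _, rfl⟩
        unfold pvLevel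
        rw [List.filter_eq_nil_iff]
        intro c hc
        simp [hz c hc]
      · rw [pvCanon, dif_neg hs]
        rw [ih (fun c => m c - 1) (fun c hc => by
          have := hb c hc; show m c - 1 ≤ N; omega)]
        rw [List.range_succ_eq_map, List.map_cons, List.flatten_cons, List.map_map]
        have h1 : pvLevel m (0 + 1) = pvLevel m 1 := by norm_num
        have h2 : List.map ((fun i => pvLevel m (i + 1)) ∘ Nat.succ) (List.range N)
            = List.map (fun i => pvLevel (fun c => m c - 1) (i + 1)) (List.range N) := by
          apply List.map_congr_left
          intro i _
          show pvLevel m (i.succ + 1) = pvLevel (fun c => m c - 1) (i + 1)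
          unfold pvLevel
          apply List.filter_congr
          intro c _
          rw [decide_eq_decide]
          show i.succ + 1 ≤ m c ↔ i + 1 ≤ m c - 1
          omega
        rw [h1, h2]

-- ----- B-side layer characterisation -----
theorem pvLayerB (L : List Char) (hsub : ∀ c ∈ L, c ∈ pvLetters) (i : Nat) :
    PySem.List.sorted ((PySem.Set.ofList L).filter
        (fun ch => decide ((1 + (i : Int)) ≤ (L.count ch : Int)))) (fun c => c) false
      = pvLevel (fun c => L.count c) (i + 1) := by
  apply pvSortedBridgeC
  · have hnd1 : (pvLevel (fun c => L.count c) (i + 1)).Nodup := pvLetters_nodup.filter _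
    rw [List.perm_ext_iff_of_nodup hnd1 ((PySem.Set.nodup_ofList L).filter _)]
    intro a
    unfold pvLevel
    rw [List.mem_filter, List.mem_filter, PySem.Set.mem_ofList]
    constructor
    · rintro ⟨ha, hcount⟩
      have hc : i + 1 ≤ L.count a := by simpa using hcount
      refine ⟨List.count_pos_iff.mp (by omega), ?_⟩
      simp
      omega
    · rintro ⟨haL, hcount⟩
      have hc : 1 + (i : Int) ≤ (L.count a : Int) := by simpa using hcount
      refine ⟨hsub a haL, ?_⟩
      simp
      omega
  · exact pvLetters_pairwise.filter _

theorem pvFoldLayers {α : Type} (g : α → List Char) (ks : List α) : ∀ (init : List Char),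
    ks.foldl (fun out k => (g k).foldl pvStep out) init
      = ((ks.map g).flatten).foldl pvStep init := by
  induction ks with
  | nil => intro init; rfl
  | cons k t ih =>
      intro init
      rw [List.foldl_cons, List.map_cons, List.flatten_cons, List.foldl_append]
      exact ih ((g k).foldl pvStep init)

theorem pvFlatMapId (lls : List (List Char)) : lls.flatMap (fun t => t) = lls.flatten := by
  induction lls with
  | nil => rfl
  | cons l t ih => simp [ih]

-- ===== VERDICT (by name: the statement is the Claim_ definition above) =====
set_option maxHeartbeats 2000000 in
theorem rearrangedString_spec : Claim_equal_rearrangedString := by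
  unfold Claim_equal_rearrangedString
  intro s _hdom hpre
  unfold Spec_rearrangedString
  unfold Pre_rearrangedString at hpre
  set ls : List Char := (PySem.Str.lower s).toList with hls
  set L : List Char := ls.filter (fun c => pvLetters.contains c) with hLdef
  set m : Char → Nat := fun c => List.count c L with hmdef
  -- ===== A side =====
  have hA : rearrangedString s = String.mk (pvDeleteNextTo (pvCanon m)) := by
    simp only [rearrangedString]
    rw [List.map_map]
    have hcomp : ((fun x => if PySem.Chars.isIn x pvLetters then x else []) ∘
        (fun c : Char => ([c] : List Char)))
        = (fun c : Char => if PySem.Chars.isIn [c] pvLetters then [c] else ([] : List Char)) := rfl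
    rw [hcomp]
    set xs2 : List (List Char) :=
      ls.map (fun c => if PySem.Chars.isIn [c] pvLetters then [c] else ([] : List Char)) with hxs2
    have hwf : ∀ x ∈ xs2, x = [] ∨ ∃ c, c ∈ pvLetters ∧ x = [c] := by
      intro x hx
      rw [hxs2] at hx
      rcases List.mem_map.mp hx with ⟨c, _, rfl⟩
      by_cases hc : PySem.Chars.isIn [c] pvLetters = true
      · exact Or.inr ⟨c, (List.singleton_infix_iff c _).mp ((PySem.Chars.isIn_iff_infix _ _).mp hc),
          by rw [if_pos hc]⟩
      · exact Or.inl (by rw [if_neg hc])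
    have hfl : (pvWhileA xs2).foldl (fun acc c => acc ++ c) [] = (pvWhileA xs2).flatten := by
      rw [PySem.List.foldl_append_eq_flatMap (fun t : List Char => t), pvFlatMapId]
      rfl
    rw [hfl, pvWhileA_flatten xs2.length xs2 le_rfl hwf]
    have hcnt : (fun c => xs2.count [c]) = m := by
      funext c
      rw [hxs2]
      exact pvCountA ls c
    rw [hcnt]
  -- ===== B side =====
  have hB : rearrangedString_alt s = String.mk ((pvCanon m).foldl pvStep []) := by
    simp only [rearrangedString_alt]
    have hg : (fun (d : PySem.Dict Char Int) (c : Char) =>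
        if PySem.Chars.isIn [c] pvLetters then d.insert c (d.getD c 0 + 1) else d)
      = (fun (d : PySem.Dict Char Int) (c : Char) =>
        if pvLetters.contains c = true then d.insert c (d.getD c 0 + 1) else d) := by
      funext d c
      rw [pvIsIn_singleton]
    rw [hg, ← List.foldl_filter]
    set D : PySem.Dict Char Int :=
      L.foldl (fun d c => d.insert c (d.getD c 0 + 1)) PySem.Dict.empty with hD
    have hget : ∀ c, D.getD c 0 = (List.count c L : Int) := by
      intro c
      rw [hD, PySem.Dict.getD_foldl_insert_add_one L PySem.Dict.empty c]
      norm_num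
    have hkeys : D.keys = PySem.Set.ofList L := by
      rw [hD, PySem.Dict.keys_foldl_insert]
      rfl
    have hndk : D.keys.Nodup := by
      rw [hD]
      exact PySem.Dict.nodup_keys_foldl_insert _ _ _ List.nodup_nil
    have hLne : L ≠ [] := by
      rcases List.any_eq_true.mp hpre with ⟨c, hcls, hcont⟩
      exact List.ne_nil_of_mem (List.mem_filter.mpr ⟨hcls, hcont⟩)
    have hkne : D.keys ≠ [] := by
      rw [hkeys]
      obtain ⟨c, hc⟩ := List.exists_mem_of_ne_nil L hLne
      exact List.ne_nil_of_mem ((PySem.Set.mem_ofList L c).mpr hc)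
    have hvals : D.values = D.keys.map (fun k => D.getD k 0) :=
      PySem.Dict.values_eq_map_keys D hndk 0
    have hvne : D.values ≠ [] := by
      rw [hvals]
      intro h
      exact hkne (List.map_eq_nil_iff.mp h)
    obtain ⟨mx, hmx⟩ : ∃ mx, PySem.List.max? D.values (fun v => v) = some mx := by
      cases hcase : PySem.List.max? D.values (fun v => v) with
      | none => exact absurd ((PySem.List.max?_eq_none_iff _ _).mp hcase) hvne
      | some v => exact ⟨v, rfl⟩
    rw [hmx]
    dsimp only
    have hmx1 : 1 ≤ mx := by
      have hmxmem := PySem.List.max?_mem hmx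
      rw [hvals] at hmxmem
      rcases List.mem_map.mp hmxmem with ⟨k, hk, rfl⟩
      rw [hget k]
      rw [hkeys, PySem.Set.mem_ofList] at hk
      have : 0 < List.count k L := List.count_pos_iff.mpr hk
      omega
    have hsub : ∀ c ∈ L, c ∈ pvLetters := by
      intro c hc
      have := (List.mem_filter.mp hc).2
      simpa using this
    have hbound : ∀ c ∈ pvLetters, (m c : Int) ≤ mx := by
      intro c _
      by_cases hcL : c ∈ L
      · have hv : D.getD c 0 ∈ D.values := by
          rw [hvals]
          exact List.mem_map.mpr ⟨c, by rw [hkeys, PySem.Set.mem_ofList]; exact hcL, rfl⟩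
        have hle := PySem.List.max?_isMax hmx _ hv
        simp only at hle
        rw [hget c] at hle
        exact hle
      · have h0 : List.count c L = 0 := List.count_eq_zero.mpr hcL
        show (List.count c L : Int) ≤ mx
        rw [h0]
        omega
    rw [PySem.List.pyRange_one]
    have hmxsub : (mx + 1 - 1) = mx := by ring
    rw [hmxsub]
    have hfold := pvFoldLayers
      (fun k => PySem.List.sorted (D.keys.filter (fun ch => decide (k ≤ D.getD ch 0)))
        (fun c => c) false)
      (List.map (fun k : Nat => (1 : Int) + (k : Int)) (List.range mx.toNat)) []
    rw [hfold, List.map_map]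
    have hmap : ((List.range mx.toNat).map ((fun k =>
        PySem.List.sorted (D.keys.filter (fun ch => decide (k ≤ D.getD ch 0)))
          (fun c => c) false) ∘ (fun k : Nat => (1 : Int) + (k : Int))))
        = (List.range mx.toNat).map (fun i => pvLevel m (i + 1)) := by
      apply List.map_congr_left
      intro i _
      show PySem.List.sorted (D.keys.filter
          (fun ch => decide ((1 + (i : Int)) ≤ D.getD ch 0))) (fun c => c) false
        = pvLevel m (i + 1)
      have hpredeq : (fun ch => decide ((1 + (i : Int)) ≤ D.getD ch 0))
          = (fun ch => decide ((1 + (i : Int)) ≤ (List.count ch L : Int))) := by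
        funext ch
        rw [hget ch]
      rw [hkeys, hpredeq]
      exact pvLayerB L hsub i
    rw [hmap]
    rw [← pvCanon_flat mx.toNat m (by
      intro c hc
      have := hbound c hc
      omega)]
  rw [hA, hB, pvDnt_eq_fold]
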